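-- pv_equiv track=rewrite | github.com/fangyuchu/vllm-ascend | vllm_ascend/worker/descale.py | init_ep2dp_map
-- ===== SOURCE A (Python) =====
-- def init_ep2dp_map(dp_size: int, tp_size: int) -> dict[int, int]:
--     ep2dp_map = {}
--     for dp_rank in range(dp_size):
--         ep_start = dp_rank * tp_size
--         ep_end = (dp_rank + 1) * tp_size
--         for ep_rank in range(ep_start, ep_end):
--             ep2dp_map[ep_rank] = dp_rank
--     return ep2dp_map
-- ===== SOURCE B (Python) =====
-- def init_ep2dp_map(dp_size: int, tp_size: int) -> dict[int, int]:
--     if dp_size <= 0 or tp_size <= 0: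
--         return {}
--     return {ep: ep // tp_size for ep in range(dp_size * tp_size)}
-- ===== Notes on version B (the rewrite author's own statement) =====
-- stated objective: idiomatic
-- what changed: Replaces the nested dp_rank/ep_start/ep_end loops by a guard plus a single flat dict comprehension over range(dp_size*tp_size) with ep // tp_size as the value.
import Mathlib
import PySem

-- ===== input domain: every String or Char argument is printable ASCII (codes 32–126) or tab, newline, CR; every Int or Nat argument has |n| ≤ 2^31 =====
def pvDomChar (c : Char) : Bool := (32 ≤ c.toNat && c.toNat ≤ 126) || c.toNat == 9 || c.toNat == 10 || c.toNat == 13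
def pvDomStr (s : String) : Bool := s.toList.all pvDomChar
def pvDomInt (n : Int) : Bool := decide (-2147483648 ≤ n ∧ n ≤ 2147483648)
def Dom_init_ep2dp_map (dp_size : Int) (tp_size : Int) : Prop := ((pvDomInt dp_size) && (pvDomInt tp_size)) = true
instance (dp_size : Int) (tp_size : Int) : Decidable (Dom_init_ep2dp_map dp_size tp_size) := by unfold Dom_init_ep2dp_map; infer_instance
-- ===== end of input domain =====

-- B replaces A's nested dp_rank loop + per-rank ep slice by one flat comprehension with ep // tp_size (idiomatic; same cost).

-- ===== PORT A =====
def init_ep2dp_map (dp_size : Int) (tp_size : Int) : List (Int × Int) :=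
  ((PySem.List.pyRange 0 dp_size 1).foldl
    (fun m dp_rank =>
      (PySem.List.pyRange (dp_rank * tp_size) ((dp_rank + 1) * tp_size) 1).foldl
        (fun m ep_rank => m.insert ep_rank dp_rank) m)
    PySem.Dict.empty).items

-- ===== PORT B =====
def init_ep2dp_map_alt (dp_size : Int) (tp_size : Int) : List (Int × Int) :=
  if dp_size ≤ 0 ∨ tp_size ≤ 0 then []
  else
    ((PySem.List.pyRange 0 (dp_size * tp_size) 1).foldl
      (fun m ep => m.insert ep (PySem.Int.floordiv ep tp_size)) PySem.Dict.empty).items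

-- ===== PRECONDITION & SPEC =====
def Spec_init_ep2dp_map (dp_size : Int) (tp_size : Int) (out : List (Int × Int)) : Prop := out = init_ep2dp_map_alt dp_size tp_size
instance (dp_size : Int) (tp_size : Int) (out : List (Int × Int)) : Decidable (Spec_init_ep2dp_map dp_size tp_size out) := by unfold Spec_init_ep2dp_map; infer_instance

-- ===== CLAIM (what is proved, stated in full; the proofs are below) =====
def Claim_equal_init_ep2dp_map : Prop := ∀ (dp_size : Int) (tp_size : Int), Dom_init_ep2dp_map dp_size tp_size → Spec_init_ep2dp_map dp_size tp_size (init_ep2dp_map dp_size tp_size)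

-- ===== LEMMAS AND PROOFS =====

-- the outer-loop body of A, named for the lemmas
def pvOuter (tp_size : Int) (m : PySem.Dict Int Int) (dp_rank : Int) : PySem.Dict Int Int :=
  (PySem.List.pyRange (dp_rank * tp_size) ((dp_rank + 1) * tp_size) 1).foldl
    (fun m ep_rank => m.insert ep_rank dp_rank) m

lemma pvOuter_id (tp_size : Int) (htp : tp_size ≤ 0) (m : PySem.Dict Int Int) (r : Int) :
    pvOuter tp_size m r = m := by
  unfold pvOuter
  rw [PySem.List.pyRange_one_eq_nil (by nlinarith)]
  rfl

lemma pvA_items (tp_size : Int) (htp : 0 < tp_size) (n : Nat) :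
    ((PySem.List.pyRange 0 (n : Int) 1).foldl (pvOuter tp_size) PySem.Dict.empty).items
      = (PySem.List.pyRange 0 ((n : Int) * tp_size) 1).map
          (fun ep => (ep, PySem.Int.floordiv ep tp_size)) := by
  induction n with
  | zero => simp [PySem.List.pyRange_one_eq_nil (by omega : (0:Int) ≤ 0)]; rfl
  | succ k ih =>
    have hcast : ((k + 1 : Nat) : Int) = (k : Int) + 1 := by push_cast; ring
    rw [hcast, PySem.List.pyRange_one_succ_right (by positivity), List.foldl_append]
    simp only [List.foldl_cons, List.foldl_nil]
    have hkeys :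
        ((PySem.List.pyRange 0 (k : Int) 1).foldl (pvOuter tp_size) PySem.Dict.empty).keys
          = PySem.List.pyRange 0 ((k : Int) * tp_size) 1 := by
      show (((PySem.List.pyRange 0 (k : Int) 1).foldl (pvOuter tp_size) PySem.Dict.empty).items.map (·.1))
          = _
      rw [ih, List.map_map]
      simp [Function.comp_def]
    rw [pvOuter]
    have hfresh := PySem.Dict.items_foldl_insert_fresh
        (PySem.List.pyRange ((k : Int) * tp_size) (((k : Int) + 1) * tp_size) 1)
        (fun a => a) (fun _ => (k : Int))
        ((PySem.List.pyRange 0 (k : Int) 1).foldl (pvOuter tp_size) PySem.Dict.empty)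
        (by
          intro a ha
          rw [PySem.Dict.contains_eq_decide_mem_keys, hkeys]
          rw [PySem.List.mem_pyRange_one] at ha
          simp only [decide_eq_false_iff_not, PySem.List.mem_pyRange_one]
          omega)
        (by rw [List.map_id']; exact PySem.List.nodup_pyRange_one ((k : Int) * tp_size) (((k : Int) + 1) * tp_size))
    beta_reduce at hfresh
    rw [hfresh, ih]
    rw [PySem.List.pyRange_one_append 0 ((k : Int) * tp_size) (((k : Int) + 1) * tp_size)
        (by positivity) (by nlinarith), List.map_append]
    congr 1
    apply List.map_congr_left
    intro a ha
    rw [PySem.List.mem_pyRange_one] at ha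
    have hfd : PySem.Int.floordiv a tp_size = (k : Int) := by
      rw [PySem.Int.floordiv_eq_iff_of_pos htp]; exact ha
    simp [hfd]

lemma pvB_items (dp_size tp_size : Int) (hdp : 0 < dp_size) (htp : 0 < tp_size) :
    init_ep2dp_map_alt dp_size tp_size
      = (PySem.List.pyRange 0 (dp_size * tp_size) 1).map
          (fun ep => (ep, PySem.Int.floordiv ep tp_size)) := by
  unfold init_ep2dp_map_alt
  rw [if_neg (by omega)]
  have hfresh := PySem.Dict.items_foldl_insert_fresh
      (PySem.List.pyRange 0 (dp_size * tp_size) 1)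
      (fun a => a) (fun a => PySem.Int.floordiv a tp_size)
      PySem.Dict.empty
      (by intro a _; exact PySem.Dict.contains_empty a)
      (by rw [List.map_id']; exact PySem.List.nodup_pyRange_one 0 (dp_size * tp_size))
  beta_reduce at hfresh
  rw [hfresh]
  simp [PySem.Dict.empty]

-- ===== VERDICT (by name: the statement is the Claim_ definition above) =====
theorem init_ep2dp_map_spec : Claim_equal_init_ep2dp_map := by
  intro dp tp _
  show init_ep2dp_map dp tp = init_ep2dp_map_alt dp tp
  by_cases hdp : dp ≤ 0
  · unfold init_ep2dp_map init_ep2dp_map_alt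
    rw [PySem.List.pyRange_one_eq_nil hdp, if_pos (Or.inl hdp)]
    rfl
  · by_cases htp : tp ≤ 0
    · unfold init_ep2dp_map init_ep2dp_map_alt
      rw [if_pos (Or.inr htp)]
      have : ∀ (l : List Int) (m : PySem.Dict Int Int),
          l.foldl (pvOuter tp) m = m := by
        intro l
        induction l with
        | nil => intro m; rfl
        | cons x xs ih => intro m; simp [List.foldl_cons, pvOuter_id tp htp, ih]
      have h2 := this (PySem.List.pyRange 0 dp 1) PySem.Dict.empty
      unfold pvOuter at h2
      rw [h2]
      rfl
    · push Not at hdp htp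
      obtain ⟨n, hn⟩ : ∃ n : Nat, dp = (n : Int) := ⟨dp.toNat, (Int.toNat_of_nonneg (by omega)).symm⟩
      subst hn
      rw [pvB_items _ _ hdp htp]
      have h := pvA_items tp htp n
      unfold pvOuter at h
      exact h
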